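-- pv_equiv track=rewrite | github.com/paiml/depyler | examples/hard_array_frequency.py | count_elements_with_frequency
-- ===== SOURCE A (Python) =====
-- def frequency_table(arr: list[int], unique_vals: list[int], counts: list[int]) -> int:
--     """Build a frequency table. Populates unique_vals and counts lists.
--     Returns number of unique values."""
--     i: int = 0
--     while i < len(arr):
--         val: int = arr[i]
--         found: int = 0
--         j: int = 0
--         while j < len(unique_vals):
--             if unique_vals[j] == val:
--                 counts[j] = counts[j] + 1
--                 found = 1
--                 j = len(unique_vals)
--             j = j + 1
--         if found == 0:
--             unique_vals.append(val)
--             counts.append(1)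
--         i = i + 1
--     return len(unique_vals)
--
-- def count_elements_with_frequency(arr: list[int], target_freq: int) -> int:
--     """Count how many distinct elements appear exactly target_freq times."""
--     unique_vals: list[int] = []
--     freqs: list[int] = []
--     frequency_table(arr, unique_vals, freqs)
--     count: int = 0
--     i: int = 0
--     while i < len(freqs):
--         if freqs[i] == target_freq:
--             count = count + 1
--         i = i + 1
--     return count
-- ===== SOURCE B (Python) =====
-- def count_elements_with_frequency(arr: list[int], target_freq: int) -> int:
--     """Count how many distinct elements appear exactly target_freq times."""
--     s = sorted(arr)
--     if not s:
--         return 0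
--     count = 0
--     run = 1
--     for i in range(1, len(s)):
--         if s[i] == s[i - 1]:
--             run += 1
--         else:
--             if run == target_freq:
--                 count += 1
--             run = 1
--     if run == target_freq:
--         count += 1
--     return count
-- ===== Notes on version B (the rewrite author's own statement) =====
-- stated objective: faster
-- what changed: Replaces the quadratic parallel-list frequency table (inner linear scan per element) with sort-then-run-length: sort a copy, count maximal runs of equal consecutive values whose length equals target_freq.
import Mathlib
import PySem

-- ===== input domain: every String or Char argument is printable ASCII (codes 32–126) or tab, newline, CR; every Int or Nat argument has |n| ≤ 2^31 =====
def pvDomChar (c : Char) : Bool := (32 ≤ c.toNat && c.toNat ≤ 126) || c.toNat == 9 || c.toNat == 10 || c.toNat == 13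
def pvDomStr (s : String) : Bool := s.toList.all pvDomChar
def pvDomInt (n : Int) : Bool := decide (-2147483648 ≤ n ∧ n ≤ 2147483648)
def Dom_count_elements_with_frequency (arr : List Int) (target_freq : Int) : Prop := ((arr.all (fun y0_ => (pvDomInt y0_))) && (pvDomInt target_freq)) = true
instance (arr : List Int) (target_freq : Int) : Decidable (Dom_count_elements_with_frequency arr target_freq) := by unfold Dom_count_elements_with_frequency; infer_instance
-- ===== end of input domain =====

-- B replaces A's quadratic parallel-list frequency table with sort-then-run-length counting (objective: faster).

-- ===== PORT A =====
-- inner while loop of frequency_table: increment count at the first index with unique_vals[j] == val,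
-- else (found == 0) append val / 1 to the parallel lists
def ftInner (uv cnts : List Int) (val : Int) : List Int × List Int :=
  match uv, cnts with
  | u :: us, c :: cs =>
      if u == val then (u :: us, (c + 1) :: cs)
      else
        let r := ftInner us cs val
        (u :: r.1, c :: r.2)
  | _, _ => ([val], [1])

-- outer while loop of frequency_table over arr
def ftLoop (arr uv cnts : List Int) : List Int × List Int :=
  match arr with
  | [] => (uv, cnts)
  | x :: xs =>
      let r := ftInner uv cnts x
      ftLoop xs r.1 r.2

def count_elements_with_frequency (arr : List Int) (target_freq : Int) : Int :=
  let r := ftLoop arr [] []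
  r.2.foldl (fun cnt c => if c == target_freq then cnt + 1 else cnt) 0

-- ===== PORT B =====
-- the for-loop of Source B: walk the sorted list carrying (prev, run, count); flush each completed run
def runPass (target_freq : Int) : List Int → Int → Int → Int → Int
  | [], _prev, run, count => if run == target_freq then count + 1 else count
  | x :: xs, prev, run, count =>
      if x == prev then runPass target_freq xs x (run + 1) count
      else runPass target_freq xs x 1 (if run == target_freq then count + 1 else count)

def count_elements_with_frequency_alt (arr : List Int) (target_freq : Int) : Int :=
  match PySem.List.sorted arr (fun x => x) false with
  | [] => 0
  | x :: xs => runPass target_freq xs x 1 0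

-- ===== PRECONDITION & SPEC =====
def Spec_count_elements_with_frequency (arr : List Int) (target_freq : Int) (out : Int) : Prop := out = count_elements_with_frequency_alt arr target_freq
instance (arr : List Int) (target_freq : Int) (out : Int) : Decidable (Spec_count_elements_with_frequency arr target_freq out) := by unfold Spec_count_elements_with_frequency; infer_instance

-- ===== CLAIM (what is proved, stated in full; the proofs are below) =====
def Claim_equal_count_elements_with_frequency : Prop := ∀ (arr : List Int) (target_freq : Int), Dom_count_elements_with_frequency arr target_freq → Spec_count_elements_with_frequency arr target_freq (count_elements_with_frequency arr target_freq)

-- ===== LEMMAS AND PROOFS =====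

-- the mathematical value both programs compute: number of distinct elements with count = target_freq
def specN (t : Int) (l : List Int) : Nat :=
  (l.toFinset.filter (fun v => (l.count v : Int) = t)).card

lemma specN_perm (t : Int) {l l' : List Int} (h : l.Perm l') : specN t l = specN t l' := by
  unfold specN
  have ht : l.toFinset = l'.toFinset := Finset.ext fun v => by
    simp [List.mem_toFinset, h.mem_iff]
  rw [ht]
  congr 1
  apply Finset.filter_congr
  intro v _
  simp [h.count_eq]

-- ---- A side ----

lemma foldl_count (t : Int) : ∀ (l : List Int) (acc : Int),
    l.foldl (fun cnt c => if c == t then cnt + 1 else cnt) acc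
      = acc + l.countP (fun c => c == t) := by
  intro l
  induction l with
  | nil => intro acc; simp
  | cons c cs ih =>
      intro acc
      rw [List.foldl_cons, ih, List.countP_cons]
      by_cases h : c = t
      · simp [h]; ring
      · simp [h]

lemma ftInner_eq : ∀ (uv : List Int) (f : Int → Int) (x : Int), uv.Nodup →
    ftInner uv (uv.map f) x =
      if x ∈ uv then (uv, uv.map (fun v => if v == x then f v + 1 else f v))
      else (uv ++ [x], uv.map f ++ [1]) := by
  intro uv
  induction uv with
  | nil => intro f x _; simp [ftInner]
  | cons u us ih =>
      intro f x hnd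
      rw [List.nodup_cons] at hnd
      by_cases hux : u = x
      · subst hux
        simp [ftInner, List.mem_cons]
        intro v hv h
        exact hnd.1 (h ▸ hv)
      · have := ih f x hnd.2
        by_cases hm : x ∈ us
        · simp [ftInner, hux, Ne.symm hux, this, hm, List.mem_cons]
        · simp [ftInner, hux, Ne.symm hux, this, hm, List.mem_cons]

lemma ftLoop_inv : ∀ (arr p uv : List Int), uv.Nodup → (∀ v, v ∈ uv ↔ v ∈ p) →
    (ftLoop arr uv (uv.map fun v => ((p.count v : Int)))).1.Nodup ∧
    (∀ v, v ∈ (ftLoop arr uv (uv.map fun v => ((p.count v : Int)))).1 ↔ v ∈ p ++ arr) ∧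
    (ftLoop arr uv (uv.map fun v => ((p.count v : Int)))).2
      = (ftLoop arr uv (uv.map fun v => ((p.count v : Int)))).1.map
          (fun v => (((p ++ arr).count v : Int))) := by
  intro arr
  induction arr with
  | nil =>
      intro p uv hnd hm
      refine ⟨hnd, ?_, ?_⟩
      · simpa [ftLoop] using hm
      · simp [ftLoop]
  | cons x xs ih =>
      intro p uv hnd hm
      rw [ftLoop]
      rw [ftInner_eq uv (fun v => ((p.count v : Int))) x hnd]
      by_cases hx : x ∈ uv
      · simp only [hx, if_true]
        have hmap : List.map (fun v => if (v == x) = true then ((p.count v : Int)) + 1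
              else ((p.count v : Int))) uv
            = uv.map (fun v => (((p ++ [x]).count v : Int))) := by
          apply List.map_congr_left
          intro v _
          by_cases hvx : v = x
          · subst hvx
            simp [List.count_append]
          · simp [List.count_append, List.count_cons, hvx]
            exact fun h => hvx h.symm
        rw [hmap]
        have hm' : ∀ v, v ∈ uv ↔ v ∈ p ++ [x] := by
          intro v
          constructor
          · intro h; exact List.mem_append_left _ ((hm v).1 h)
          · intro h
            rcases List.mem_append.1 h with h | h
            · exact (hm v).2 h
            · simp at h; exact h ▸ hx
        have := ih (p ++ [x]) uv hnd hm'
        simpa [List.append_assoc] using this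
      · simp only [hx, if_false]
        have hnd' : (uv ++ [x]).Nodup := by
          simp [List.nodup_append, hnd]
          exact fun a ha h => hx (h ▸ ha)
        have hxp : x ∉ p := fun h => hx ((hm x).2 h)
        have hmap : List.map (fun v => ((p.count v : Int))) uv ++ [1]
            = (uv ++ [x]).map (fun v => (((p ++ [x]).count v : Int))) := by
          rw [List.map_append]
          congr 1
          · apply List.map_congr_left
            intro v hv
            have : ¬ x = v := fun h => hx (h ▸ hv)
            simp [List.count_append, this]
          · simp [List.count_append, List.count_cons, List.count_eq_zero_of_not_mem hxp]
        rw [hmap]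
        have hm' : ∀ v, v ∈ uv ++ [x] ↔ v ∈ p ++ [x] := by
          intro v; simp [hm v]
        have := ih (p ++ [x]) (uv ++ [x]) hnd' hm'
        simpa [List.append_assoc] using this

lemma A_eq_specN (arr : List Int) (t : Int) :
    count_elements_with_frequency arr t = (specN t arr : Int) := by
  obtain ⟨hnd, hm, hc⟩ := ftLoop_inv arr [] [] (by simp) (by simp)
  simp only [List.map_nil, List.nil_append] at hnd hm hc
  unfold count_elements_with_frequency
  show List.foldl (fun cnt c => if (c == t) = true then cnt + 1 else cnt) 0
      (ftLoop arr [] []).2 = ((specN t arr : Nat) : Int)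
  rw [hc, foldl_count, List.countP_map]
  have hcp : (List.countP ((fun c => c == t) ∘ fun v => ((arr.count v : Int)))
        (ftLoop arr [] []).1)
      = (((ftLoop arr [] []).1.filter (fun v => ((arr.count v : Int)) == t)).length) := by
    rw [List.countP_eq_length_filter]; rfl
  rw [hcp]
  have hfn : ((ftLoop arr [] []).1.filter (fun v => ((arr.count v : Int)) == t)).Nodup :=
    hnd.filter _
  rw [← List.toFinset_card_of_nodup hfn, List.toFinset_filter]
  have htf : (ftLoop arr [] []).1.toFinset = arr.toFinset :=
    Finset.ext fun v => by simp [List.mem_toFinset, hm v]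
  rw [htf]
  unfold specN
  rw [zero_add]
  have hfe : {x ∈ arr.toFinset | (((arr.count x : Int)) == t) = true}
      = {v ∈ arr.toFinset | ((arr.count v : Int)) = t} := by
    apply Finset.filter_congr
    intro v _
    simp
  rw [hfe]

-- ---- B side ----

lemma runPass_nil_spec (t x : Int) (k : Nat) (c : Int) :
    runPass t [] x (1 + (k : Int)) c = c + specN t (List.replicate k x ++ [x]) := by
  have hrep : List.replicate k x ++ [x] = List.replicate (k + 1) x :=
    List.replicate_succ'.symm
  rw [hrep]
  unfold specN
  rw [List.toFinset_replicate_of_ne_zero (Nat.succ_ne_zero k), Finset.filter_singleton]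
  have hcnt : (((List.replicate (k + 1) x).count x : Int)) = 1 + (k : Int) := by
    rw [List.count_replicate_self]; push_cast; ring
  by_cases h : (1 : Int) + (k : Int) = t
  · simp [runPass, h]
    rw [if_pos (show ((k : Int)) + 1 = t by omega)]
    simp
  · simp [runPass, h]
    omega

lemma specN_run_split (t x : Int) (k : Nat) (l : List Int) (hx : ∀ v ∈ l, ¬ v = x) :
    specN t (List.replicate k x ++ x :: l)
      = (if ((1 : Int) + (k : Int) = t) then 1 else 0) + specN t l := by
  have hrw : List.replicate k x ++ x :: l = List.replicate (k + 1) x ++ l := by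
    rw [List.replicate_succ', List.append_assoc]; rfl
  rw [hrw]
  unfold specN
  have hxl : x ∉ l := fun h => hx x h rfl
  have htf : (List.replicate (k + 1) x ++ l).toFinset = insert x l.toFinset := by
    rw [List.toFinset_append, List.toFinset_replicate_of_ne_zero (Nat.succ_ne_zero k)]
    ext v; simp
  rw [htf]
  have hcx : ((List.replicate (k + 1) x ++ l).count x : Int) = (1 : Int) + (k : Int) := by
    rw [List.count_append, List.count_replicate_self, List.count_eq_zero_of_not_mem hxl]
    push_cast; ring
  have hcv : ∀ v ∈ l.toFinset, (((List.replicate (k + 1) x ++ l).count v : Int) = t)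
      = ((l.count v : Int) = t) := by
    intro v hv
    have hvx : ¬ x = v := fun h => hx v (List.mem_toFinset.1 hv) h.symm
    rw [List.count_append, List.count_replicate]
    simp [hvx]
  rw [Finset.filter_insert]
  have hfc : {v ∈ l.toFinset | ((List.replicate (k + 1) x ++ l).count v : Int) = t}
      = {v ∈ l.toFinset | ((l.count v : Int)) = t} := by
    apply Finset.filter_congr
    intro v hv
    exact iff_of_eq (hcv v hv)
  rw [hfc]
  by_cases h : (1 : Int) + (k : Int) = t
  · rw [if_pos (hcx.trans h), if_pos h]
    rw [Finset.card_insert_of_notMem (fun hmem => hxl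
      (List.mem_toFinset.1 (Finset.mem_of_mem_filter x hmem)))]
    ring
  · rw [if_neg (fun hc => h (hcx ▸ hc)), if_neg h]
    ring

lemma runPass_main (t : Int) : ∀ (n : Nat) (l : List Int) (x : Int) (k : Nat) (c : Int),
    l.length ≤ n → (x :: l).Pairwise (· ≤ ·) →
    runPass t l x (1 + (k : Int)) c = c + specN t (List.replicate k x ++ x :: l) := by
  intro n
  induction n with
  | zero =>
      intro l x k c hlen _
      have : l = [] := List.length_eq_zero_iff.1 (Nat.le_zero.1 hlen)
      subst this
      rw [runPass_nil_spec]
  | succ n ih =>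
      intro l x k c hlen hp
      match l with
      | [] => rw [runPass_nil_spec]
      | y :: ys =>
        by_cases hyx : y = x
        · subst hyx
          have h1 : runPass t (y :: ys) y (1 + (k : Int)) c
              = runPass t ys y (1 + (k : Int) + 1) c := by simp [runPass]
          have h2 : (1 : Int) + (k : Int) + 1 = 1 + ((k + 1 : Nat) : Int) := by
            push_cast; ring
          rw [h1, h2]
          have hp' : (y :: ys).Pairwise (· ≤ ·) := hp.sublist (by
            exact (List.sublist_cons_self y ys).cons₂ y)
          have hlen' : ys.length ≤ n := by
            simp [List.length_cons] at hlen; omega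
          rw [ih ys y (k + 1) c hlen' hp']
          have hl : List.replicate (k + 1) y ++ y :: ys
              = List.replicate k y ++ y :: y :: ys := by
            rw [List.replicate_succ', List.append_assoc]; rfl
          rw [hl]
        · have h1 : runPass t (y :: ys) x (1 + (k : Int)) c
              = runPass t ys y 1 (if ((1 + (k : Int)) == t) = true then c + 1 else c) := by
            simp [runPass, hyx]
          have hxy : ∀ v ∈ y :: ys, ¬ v = x := by
            intro v hv hvx
            have hxy' : x ≤ y := (List.pairwise_cons.1 hp).1 y (by simp)
            rcases List.mem_cons.1 hv with h | h
            · exact hyx (h.symm.trans hvx)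
            · have hyle : y ≤ v := (List.pairwise_cons.1 (hp.sublist
                (List.sublist_cons_self x (y :: ys)))).1 v h
              omega
          have hp' : (y :: ys).Pairwise (· ≤ ·) :=
            hp.sublist (List.sublist_cons_self x (y :: ys))
          have hlen' : ys.length ≤ n := by
            simp [List.length_cons] at hlen; omega
          have h2 := ih ys y 0 (if ((1 + (k : Int)) == t) = true then c + 1 else c) hlen' hp'
          simp only [Nat.cast_zero, add_zero, List.replicate_zero, List.nil_append] at h2
          rw [h1, h2, specN_run_split t x k (y :: ys) hxy]
          by_cases hteq : (1 : Int) + (k : Int) = t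
          · simp only [hteq, beq_self_eq_true, if_true]
            push_cast
            ring
          · have : ((1 : Int) + (k : Int) == t) = false := by simp [hteq]
            simp only [this, hteq, if_false, Bool.false_eq_true]
            push_cast
            ring

lemma B_eq_specN (arr : List Int) (t : Int) :
    count_elements_with_frequency_alt arr t = (specN t arr : Int) := by
  unfold count_elements_with_frequency_alt
  rcases hs : PySem.List.sorted arr (fun x => x) false with _ | ⟨x, xs⟩
  · have : arr = [] := (PySem.List.sorted_eq_nil_iff arr (fun x => x) false).1 hs
    subst this
    simp [specN]
  · have hperm : (x :: xs).Perm arr := hs ▸ PySem.List.sorted_perm arr (fun x => x) false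
    have hpw : (x :: xs).Pairwise (· ≤ ·) := by
      have := PySem.List.sorted_pairwise arr (fun x => x)
      rw [hs] at this
      exact this
    have h := runPass_main t xs.length xs x 0 0 le_rfl hpw
    simp only [Nat.cast_zero, add_zero, List.replicate_zero, List.nil_append, zero_add] at h
    show runPass t xs x 1 0 = ((specN t arr : Nat) : Int)
    rw [h, specN_perm t hperm]

-- ===== VERDICT (by name: the statement is the Claim_ definition above) =====
theorem count_elements_with_frequency_spec : Claim_equal_count_elements_with_frequency := by
  intro arr t _
  unfold Spec_count_elements_with_frequency
  rw [A_eq_specN, B_eq_specN]
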